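-- pv_equiv track=rewrite | github.com/gzavlanis/myFirstProject | excercises_1.py | PalindromeCreator
-- ===== SOURCE A (Python) =====
-- def PalindromeCreator(strParam):
--     def is_palindrome(v):
--         return v == v[::-1]
--
--     if is_palindrome(strParam):
--         return 'palindrome'
--
--     for i in range(len(strParam)):
--         v = strParam[:i] + strParam[i + 1:]
--         if is_palindrome(v) and len(v) > 2:
--             return strParam[i]
--
--     for i in range(len(strParam)):
--         for j in range(i + 1, len(strParam)):
--             v = strParam[:i] + strParam[i + 1:j] + strParam[j + 1:]
--             if is_palindrome(v) and len(v) > 2: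
--                 return strParam[i] + strParam[j]
--
--     return 'not possible'
-- ===== SOURCE B (Python) =====
-- def PalindromeCreator(strParam):
--     # Faster alternative: O(n) precomputed shifted-mirror prefix-count tables make each
--     # deletion-candidate palindrome test O(1) (no string is ever rebuilt), so the single
--     # pass costs O(n) and the pair pass O(n^2) instead of A's O(n^3).
--     s = strParam
--     n = len(s)
--     # cnt[d][x] = number of t < x with s[t] == s[(n-3+d)-t] (positions whose partner
--     # index is out of range count as mismatches; queries never cover them)
--     cnt = []
--     for d in range(5):
--         S = n - 3 + d
--         c = [0]
--         for x in range(n):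
--             ok = 0 <= S - x < n and s[x] == s[S - x]
--             c.append(c[-1] + (1 if ok else 0))
--         cnt.append(c)
--
--     def allm(d, lo, hi):
--         # all x in [lo, hi): s[x] == s[(n-3+d)-x], in O(1)
--         if lo >= hi:
--             return True
--         c = cnt[d]
--         return c[hi] - c[lo] == hi - lo
--
--     if allm(2, 0, n):
--         return 'palindrome'
--
--     # Deleting position(s) leaves t with t[a] = s[a + da] where the shift da is constant
--     # on intervals of a; a is a palindrome position pair (a, m-1-a) with partner shift db,
--     # so t is a palindrome iff on every intersection cell the shifted-mirror
--     # predicate s[x] == s[(m-1+da+db)-x] holds throughout, an O(1) counter query.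
--     if n > 3:
--         m = n - 1
--         for i in range(n):
--             segA = ((0, 0, i), (1, i, m))                      # (da, interval of a)
--             segB = ((1, 0, n - 1 - i), (0, n - 1 - i, m))      # (db, interval of a)
--             if all(allm(1 + da + db, max(la, lb) + da, min(ha, hb) + da)
--                    for da, la, ha in segA for db, lb, hb in segB):
--                 return s[i]
--
--     if n > 4:
--         m = n - 2
--         for i in range(n):
--             for j in range(i + 1, n):
--                 segA = ((0, 0, i), (1, i, j - 1), (2, j - 1, m))
--                 segB = ((2, 0, n - 1 - j), (1, n - 1 - j, n - 2 - i), (0, n - 2 - i, m))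
--                 if all(allm(da + db, max(la, lb) + da, min(ha, hb) + da)
--                        for da, la, ha in segA for db, lb, hb in segB):
--                     return s[i] + s[j]
--
--     return 'not possible'
-- ===== Notes on version B (the rewrite author's own statement) =====
-- stated objective: faster
-- what changed: Instead of rebuilding each deletion candidate by slicing and reversing it (O(n) per check), B precomputes five shifted-mirror prefix-count tables once and decides every single- or pair-deletion candidate in O(1) by constant-shift interval queries over the intersection grid of shift cells, keeping A's scan order.
import Mathlib
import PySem

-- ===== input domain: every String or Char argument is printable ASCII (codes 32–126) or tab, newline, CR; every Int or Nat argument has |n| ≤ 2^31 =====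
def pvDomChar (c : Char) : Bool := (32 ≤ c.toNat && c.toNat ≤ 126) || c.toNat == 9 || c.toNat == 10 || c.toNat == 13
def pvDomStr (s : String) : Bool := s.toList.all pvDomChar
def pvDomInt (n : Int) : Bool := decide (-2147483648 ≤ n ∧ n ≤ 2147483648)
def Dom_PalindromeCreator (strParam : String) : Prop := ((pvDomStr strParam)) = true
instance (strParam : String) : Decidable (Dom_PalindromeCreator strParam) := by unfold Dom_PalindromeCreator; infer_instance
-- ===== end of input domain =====

-- B replaces A's per-candidate slice-and-reverse palindrome tests (O(n) each) by five
-- precomputed shifted-mirror prefix-count tables queried in O(1) per candidate: O(n^2) total vs A's O(n^3).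

-- ===== PORT A =====
-- is_palindrome(v): v == v[::-1]
def pvAIsPal (v : List Char) : Bool :=
  v == (PySem.List.slice? v none none (-1)).getD []   -- step ≠ 0, never raises

-- first loop: for i in range(len(s)): v = s[:i] + s[i+1:]; if is_palindrome(v) and len(v) > 2: return s[i]
def pvALoop1 (s : List Char) : List Int → Option String
  | [] => none
  | i :: rest =>
      let v := PySem.List.slice s none (some i) ++ PySem.List.slice s (some (i + 1)) none
      if pvAIsPal v && decide (2 < v.length) then
        some (String.ofList (PySem.List.pyGet? s i).toList)   -- index always in range here
      else pvALoop1 s rest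

-- inner of second loop: for j in range(i+1, len(s)): v = s[:i] + s[i+1:j] + s[j+1:]; …: return s[i] + s[j]
def pvALoop2Inner (s : List Char) (i : Int) : List Int → Option String
  | [] => none
  | j :: rest =>
      let v := PySem.List.slice s none (some i) ++ PySem.List.slice s (some (i + 1)) (some j)
                 ++ PySem.List.slice s (some (j + 1)) none
      if pvAIsPal v && decide (2 < v.length) then
        some (String.ofList ((PySem.List.pyGet? s i).toList ++ (PySem.List.pyGet? s j).toList))
      else pvALoop2Inner s i rest

def pvALoop2 (s : List Char) : List Int → Option String
  | [] => none
  | i :: rest =>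
      match pvALoop2Inner s i (PySem.List.pyRange (i + 1) s.length 1) with
      | some out => some out
      | none => pvALoop2 s rest

def PalindromeCreator (strParam : String) : String :=
  let s := strParam.toList
  if pvAIsPal s then "palindrome"
  else
    match pvALoop1 s (PySem.List.pyRange 0 s.length 1) with
    | some out => out
    | none =>
        match pvALoop2 s (PySem.List.pyRange 0 s.length 1) with
        | some out => out
        | none => "not possible"

-- ===== PORT B =====
-- ok = 0 <= S - x < n and s[x] == s[S - x]
def pvBOk (s : List Char) (S : Int) (x : Nat) : Bool :=
  decide (0 ≤ S - (x : Int)) && decide (S - (x : Int) < (s.length : Int)) &&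
    (s[x]? == s[(S - (x : Int)).toNat]?)

-- c = [0]; for x in range(n): c.append(c[-1] + (1 if ok else 0))
def pvBRow (s : List Char) (S : Int) : List Int :=
  (List.range s.length).foldl
    (fun c x => c ++ [(PySem.List.pyGet? c (-1)).getD 0 + (if pvBOk s S x then 1 else 0)]) [0]

-- cnt = [row for d in range(5)] with S = n - 3 + d
def pvBCnt (s : List Char) : List (List Int) :=
  (List.range 5).map (fun (d : Nat) => pvBRow s ((s.length : Int) - 3 + (d : Int)))

-- allm(d, lo, hi): if lo >= hi: True else c[hi] - c[lo] == hi - lo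
def pvAllm (cnt : List (List Int)) (d lo hi : Nat) : Bool :=
  if hi ≤ lo then true
  else ((cnt.getD d []).getD hi 0 - (cnt.getD d []).getD lo 0) == ((hi : Int) - (lo : Int))

-- single-deletion test: 2x2 grid of shift cells, each an O(1) interval query
def pvBCheck1 (cnt : List (List Int)) (n i : Nat) : Bool :=
  ([(0, 0, i), (1, i, n - 1)] : List (Nat × Nat × Nat)).all fun (da, la, ha) =>
    ([(1, 0, n - 1 - i), (0, n - 1 - i, n - 1)] : List (Nat × Nat × Nat)).all fun (db, lb, hb) =>
      pvAllm cnt (1 + da + db) (max la lb + da) (min ha hb + da)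

-- pair-deletion test: 3x3 grid of shift cells
def pvBCheck2 (cnt : List (List Int)) (n i j : Nat) : Bool :=
  ([(0, 0, i), (1, i, j - 1), (2, j - 1, n - 2)] : List (Nat × Nat × Nat)).all fun (da, la, ha) =>
    ([(2, 0, n - 1 - j), (1, n - 1 - j, n - 2 - i), (0, n - 2 - i, n - 2)] : List (Nat × Nat × Nat)).all
      fun (db, lb, hb) =>
        pvAllm cnt (da + db) (max la lb + da) (min ha hb + da)

def pvBLoop1 (s : List Char) (cnt : List (List Int)) : List Nat → Option String
  | [] => none
  | i :: rest =>
      if pvBCheck1 cnt s.length i then some (String.ofList s[i]?.toList)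
      else pvBLoop1 s cnt rest

def pvBLoop2Inner (s : List Char) (cnt : List (List Int)) (i : Nat) : List Nat → Option String
  | [] => none
  | j :: rest =>
      if pvBCheck2 cnt s.length i j then some (String.ofList (s[i]?.toList ++ s[j]?.toList))
      else pvBLoop2Inner s cnt i rest

def pvBLoop2 (s : List Char) (cnt : List (List Int)) : List Nat → Option String
  | [] => none
  | i :: rest =>
      match pvBLoop2Inner s cnt i (List.range' (i + 1) (s.length - (i + 1))) with
      | some out => some out
      | none => pvBLoop2 s cnt rest

def PalindromeCreator_alt (strParam : String) : String :=
  let s := strParam.toList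
  let n := s.length
  let cnt := pvBCnt s
  if pvAllm cnt 2 0 n then "palindrome"
  else
    match (if 3 < n then pvBLoop1 s cnt (List.range n) else none) with
    | some out => out
    | none =>
        match (if 4 < n then pvBLoop2 s cnt (List.range n) else none) with
        | some out => out
        | none => "not possible"

-- ===== PRECONDITION & SPEC =====
def Spec_PalindromeCreator (strParam : String) (out : String) : Prop := out = PalindromeCreator_alt strParam
instance (strParam : String) (out : String) : Decidable (Spec_PalindromeCreator strParam out) := by unfold Spec_PalindromeCreator; infer_instance

-- ===== CLAIM (what is proved, stated in full; the proofs are below) =====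
def Claim_equal_PalindromeCreator : Prop := ∀ (strParam : String), Dom_PalindromeCreator strParam → Spec_PalindromeCreator strParam (PalindromeCreator strParam)

-- ===== LEMMAS AND PROOFS =====

-- proof-side views
def pvF (s : List Char) (x : Nat) : Char := s.getD x ' '
def pvG1 (i a : Nat) : Nat := if a < i then a else a + 1
def pvG2 (i j a : Nat) : Nat := if a < i then a else if a < j - 1 then a + 1 else a + 2
def pvV2 (s : List Char) (i j : Nat) : List Char :=
  s.take i ++ (s.drop (i + 1)).take (j - (i + 1)) ++ s.drop (j + 1)

lemma pvLastConcat (l : List Int) (a : Int) : (PySem.List.pyGet? (l ++ [a]) (-1)).getD 0 = a := by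
  simp

lemma pvRow_aux (s : List Char) (S : Int) : ∀ (k : Nat),
    (List.range k).foldl
      (fun c x => c ++ [(PySem.List.pyGet? c (-1)).getD 0 + (if pvBOk s S x then 1 else 0)]) [0]
    = (List.range (k + 1)).map (fun x => (((List.range x).countP (pvBOk s S) : Nat) : Int)) := by
  intro k
  induction k with
  | zero => simp [List.range_succ]
  | succ k ih =>
      rw [List.range_succ, List.foldl_append, ih]
      simp only [List.foldl_cons, List.foldl_nil]
      have hlast : (PySem.List.pyGet? ((List.range (k + 1)).map
          (fun x => (((List.range x).countP (pvBOk s S) : Nat) : Int))) (-1)).getD 0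
          = (((List.range k).countP (pvBOk s S) : Nat) : Int) := by
        rw [List.range_succ, List.map_append, List.map_singleton, pvLastConcat]
      rw [hlast, List.range_succ (n := k + 1), List.map_append, List.map_singleton]
      congr 1
      rw [List.range_succ (n := k), List.countP_append]
      simp [List.countP_cons]


lemma pvRow_val (s : List Char) (S : Int) (x : Nat) (hx : x ≤ s.length) :
    (pvBRow s S).getD x 0 = (((List.range x).countP (pvBOk s S) : Nat) : Int) := by
  rw [pvBRow, pvRow_aux]
  rw [List.getD_eq_getElem _ _ (by simpa using by omega : x < ((List.range (s.length + 1)).map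
    (fun x => (((List.range x).countP (pvBOk s S) : Nat) : Int))).length)]
  simp


lemma pvAllm_spec (s : List Char) (d lo hi : Nat) (hd : d < 5) (hhi : hi ≤ s.length) :
    pvAllm (pvBCnt s) d lo hi
      = decide (∀ x, lo ≤ x → x < hi → pvBOk s ((s.length : Int) - 3 + (d : Int)) x = true) := by
  have hrow : (pvBCnt s).getD d [] = pvBRow s ((s.length : Int) - 3 + (d : Int)) := by
    rw [pvBCnt, List.getD_eq_getElem _ _ (by simpa using hd)]
    simp only [List.getElem_map, List.getElem_range]
  rw [pvAllm, hrow]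
  by_cases h : hi ≤ lo
  · rw [if_pos h]
    exact (decide_eq_true (by intro x h1 h2; omega)).symm
  · rw [if_neg h]
    rw [pvRow_val s _ hi hhi, pvRow_val s _ lo (by omega)]
    rw [Bool.eq_iff_iff, beq_iff_eq, decide_eq_true_eq]
    have hsplit : List.range hi = List.range lo ++ (List.range (hi - lo)).map (fun t => lo + t) := by
      rw [← List.range_add]
      congr 1
      omega
    rw [hsplit, List.countP_append, List.countP_map]
    have hle : (List.range (hi - lo)).countP ((pvBOk s ((s.length : Int) - 3 + (d : Int))) ∘ (fun t => lo + t)) ≤ hi - lo := by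
      simpa using List.countP_le_length (l := List.range (hi - lo))
    constructor
    · intro H x h1 h2
      have hc : (List.range (hi - lo)).countP ((pvBOk s ((s.length : Int) - 3 + (d : Int))) ∘ (fun t => lo + t)) = (List.range (hi - lo)).length := by
        rw [List.length_range]
        omega
      have := List.countP_eq_length.mp hc (x - lo) (by rw [List.mem_range]; omega)
      simpa [show lo + (x - lo) = x by omega] using this
    · intro H
      have hc : (List.range (hi - lo)).countP ((pvBOk s ((s.length : Int) - 3 + (d : Int))) ∘ (fun t => lo + t)) = (List.range (hi - lo)).length := by
        apply List.countP_eq_length.mpr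
        intro t ht
        rw [List.mem_range] at ht
        simpa using H (lo + t) (by omega) (by omega)
      rw [List.length_range] at hc
      rw [hc]
      push_cast
      omega


lemma pvBOk_iff (s : List Char) (S : Int) (x y : Nat) (hx : x < s.length) (hy : y < s.length)
    (hxy : (x : Int) + (y : Int) = S) : (pvBOk s S x = true) ↔ pvF s x = pvF s y := by
  have h1 : S - (x : Int) = ((y : Nat) : Int) := by omega
  rw [pvBOk, pvF, pvF, h1]
  rw [List.getD_eq_getElem _ _ hx, List.getD_eq_getElem _ _ hy]
  simp [hx, hy]


lemma pvCell (s : List Char) (g : Nat → Nat) (m d da lo hi : Nat)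
    (hd : d < 5) (hhi : hi + da ≤ s.length)
    (hg : ∀ a, lo ≤ a → a < hi → g a = a + da ∧ g (m - 1 - a) < s.length ∧
      ((g a : Int) + (g (m - 1 - a) : Int) = (s.length : Int) - 3 + (d : Int))) :
    pvAllm (pvBCnt s) d (lo + da) (hi + da)
      = decide (∀ a, lo ≤ a → a < hi → pvF s (g a) = pvF s (g (m - 1 - a))) := by
  rw [pvAllm_spec s d _ _ hd hhi, decide_eq_decide]
  constructor
  · intro H a h1 h2
    obtain ⟨e1, e2, e3⟩ := hg a h1 h2
    have hOk := H (a + da) (by omega) (by omega)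
    rw [← e1] at hOk
    exact (pvBOk_iff s _ (g a) (g (m - 1 - a)) (by omega) e2 e3).mp hOk
  · intro H x h1 h2
    obtain ⟨e1, e2, e3⟩ := hg (x - da) (by omega) (by omega)
    have hp := H (x - da) (by omega) (by omega)
    rw [show x = g (x - da) by omega]
    exact (pvBOk_iff s _ (g (x - da)) (g (m - 1 - (x - da))) (by omega) e2 e3).mpr hp


lemma pvAIsPal_getD (t : List Char) :
    pvAIsPal t = decide (∀ a, a < t.length → pvF t a = pvF t (t.length - 1 - a)) := by
  rw [pvAIsPal, PySem.List.slice?_none_none_neg_one, Option.getD_some]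
  rw [Bool.eq_iff_iff, beq_iff_eq, decide_eq_true_eq]
  constructor
  · intro h a ha
    have hb : t.length - 1 - a < t.length := by omega
    rw [pvF, pvF, List.getD_eq_getElem _ _ ha, List.getD_eq_getElem _ _ hb]
    calc t[a] = t.reverse[a]'(by simpa using ha) := by
          exact (List.getElem_of_eq h.symm _).symm
      _ = t[t.length - 1 - a] := by rw [List.getElem_reverse]
  · intro H
    apply List.ext_getElem (by simp)
    intro a h1 h2
    rw [List.getElem_reverse]
    have hb : t.length - 1 - a < t.length := by omega
    have := H a h1
    rw [pvF, pvF, List.getD_eq_getElem _ _ h1, List.getD_eq_getElem _ _ hb] at this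
    exact this


lemma pvBCheck1_eq (s : List Char) (i : Nat) (_hi : i < s.length) :
    pvBCheck1 (pvBCnt s) s.length i
      = decide (∀ a, a < s.length - 1 → pvF s (pvG1 i a) = pvF s (pvG1 i (s.length - 1 - 1 - a))) := by
  have hc1 := pvCell s (pvG1 i) (s.length - 1) (1 + 0 + 1) 0 (max 0 0) (min i (s.length - 1 - i))
    (by omega) (by omega)
    (by intro a h1 h2; refine ⟨?_, ?_, ?_⟩ <;> simp only [pvG1] <;> split_ifs <;> push_cast <;> omega)
  have hc2 := pvCell s (pvG1 i) (s.length - 1) (1 + 0 + 0) 0 (max 0 (s.length - 1 - i)) (min i (s.length - 1))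
    (by omega) (by omega)
    (by intro a h1 h2; refine ⟨?_, ?_, ?_⟩ <;> simp only [pvG1] <;> split_ifs <;> push_cast <;> omega)
  have hc3 := pvCell s (pvG1 i) (s.length - 1) (1 + 1 + 1) 1 (max i 0) (min (s.length - 1) (s.length - 1 - i))
    (by omega) (by omega)
    (by intro a h1 h2; refine ⟨?_, ?_, ?_⟩ <;> simp only [pvG1] <;> split_ifs <;> push_cast <;> omega)
  have hc4 := pvCell s (pvG1 i) (s.length - 1) (1 + 1 + 0) 1 (max i (s.length - 1 - i)) (min (s.length - 1) (s.length - 1))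
    (by omega) (by omega)
    (by intro a h1 h2; refine ⟨?_, ?_, ?_⟩ <;> simp only [pvG1] <;> split_ifs <;> push_cast <;> omega)
  rw [pvBCheck1]
  simp only [List.all_cons, List.all_nil, Bool.and_true]
  rw [hc1, hc2, hc3, hc4]
  rw [Bool.eq_iff_iff]
  simp only [Bool.and_eq_true, decide_eq_true_eq]
  constructor
  · rintro ⟨⟨H1, H2⟩, H3, H4⟩ a ha
    by_cases h1 : a < i <;> by_cases h2 : a < s.length - 1 - i
    · exact H1 a (by omega) (by omega)
    · exact H2 a (by omega) (by omega)
    · exact H3 a (by omega) (by omega)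
    · exact H4 a (by omega) (by omega)
  · intro H
    refine ⟨⟨?_, ?_⟩, ?_, ?_⟩ <;> intro a h1 h2 <;> exact H a (by omega)


lemma pvBCheck2_eq (s : List Char) (i j : Nat) (hij : i < j) (hj : j < s.length) :
    pvBCheck2 (pvBCnt s) s.length i j
      = decide (∀ a, a < s.length - 2 → pvF s (pvG2 i j a) = pvF s (pvG2 i j (s.length - 2 - 1 - a))) := by
  have hc11 := pvCell s (pvG2 i j) (s.length - 2) (0 + 2) 0 (max 0 0) (min i (s.length - 1 - j))
    (by omega) (by omega)
    (by intro a h1 h2; refine ⟨?_, ?_, ?_⟩ <;> simp only [pvG2] <;> split_ifs <;> push_cast <;> omega)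
  have hc12 := pvCell s (pvG2 i j) (s.length - 2) (0 + 1) 0 (max 0 (s.length - 1 - j)) (min i (s.length - 2 - i))
    (by omega) (by omega)
    (by intro a h1 h2; refine ⟨?_, ?_, ?_⟩ <;> simp only [pvG2] <;> split_ifs <;> push_cast <;> omega)
  have hc13 := pvCell s (pvG2 i j) (s.length - 2) (0 + 0) 0 (max 0 (s.length - 2 - i)) (min i (s.length - 2))
    (by omega) (by omega)
    (by intro a h1 h2; refine ⟨?_, ?_, ?_⟩ <;> simp only [pvG2] <;> split_ifs <;> push_cast <;> omega)
  have hc21 := pvCell s (pvG2 i j) (s.length - 2) (1 + 2) 1 (max i 0) (min (j - 1) (s.length - 1 - j))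
    (by omega) (by omega)
    (by intro a h1 h2; refine ⟨?_, ?_, ?_⟩ <;> simp only [pvG2] <;> split_ifs <;> push_cast <;> omega)
  have hc22 := pvCell s (pvG2 i j) (s.length - 2) (1 + 1) 1 (max i (s.length - 1 - j)) (min (j - 1) (s.length - 2 - i))
    (by omega) (by omega)
    (by intro a h1 h2; refine ⟨?_, ?_, ?_⟩ <;> simp only [pvG2] <;> split_ifs <;> push_cast <;> omega)
  have hc23 := pvCell s (pvG2 i j) (s.length - 2) (1 + 0) 1 (max i (s.length - 2 - i)) (min (j - 1) (s.length - 2))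
    (by omega) (by omega)
    (by intro a h1 h2; refine ⟨?_, ?_, ?_⟩ <;> simp only [pvG2] <;> split_ifs <;> push_cast <;> omega)
  have hc31 := pvCell s (pvG2 i j) (s.length - 2) (2 + 2) 2 (max (j - 1) 0) (min (s.length - 2) (s.length - 1 - j))
    (by omega) (by omega)
    (by intro a h1 h2; refine ⟨?_, ?_, ?_⟩ <;> simp only [pvG2] <;> split_ifs <;> push_cast <;> omega)
  have hc32 := pvCell s (pvG2 i j) (s.length - 2) (2 + 1) 2 (max (j - 1) (s.length - 1 - j)) (min (s.length - 2) (s.length - 2 - i))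
    (by omega) (by omega)
    (by intro a h1 h2; refine ⟨?_, ?_, ?_⟩ <;> simp only [pvG2] <;> split_ifs <;> push_cast <;> omega)
  have hc33 := pvCell s (pvG2 i j) (s.length - 2) (2 + 0) 2 (max (j - 1) (s.length - 2 - i)) (min (s.length - 2) (s.length - 2))
    (by omega) (by omega)
    (by intro a h1 h2; refine ⟨?_, ?_, ?_⟩ <;> simp only [pvG2] <;> split_ifs <;> push_cast <;> omega)
  rw [pvBCheck2]
  simp only [List.all_cons, List.all_nil, Bool.and_true]
  rw [hc11, hc12, hc13, hc21, hc22, hc23, hc31, hc32, hc33]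
  rw [Bool.eq_iff_iff]
  simp only [Bool.and_eq_true, decide_eq_true_eq]
  constructor
  · rintro ⟨⟨H11, H12, H13⟩, ⟨H21, H22, H23⟩, H31, H32, H33⟩ a ha
    by_cases h1 : a < i
    · by_cases h3 : a < s.length - 1 - j
      · exact H11 a (by omega) (by omega)
      · by_cases h4 : a < s.length - 2 - i
        · exact H12 a (by omega) (by omega)
        · exact H13 a (by omega) (by omega)
    · by_cases h2 : a < j - 1
      · by_cases h3 : a < s.length - 1 - j
        · exact H21 a (by omega) (by omega)
        · by_cases h4 : a < s.length - 2 - i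
          · exact H22 a (by omega) (by omega)
          · exact H23 a (by omega) (by omega)
      · by_cases h3 : a < s.length - 1 - j
        · exact H31 a (by omega) (by omega)
        · by_cases h4 : a < s.length - 2 - i
          · exact H32 a (by omega) (by omega)
          · exact H33 a (by omega) (by omega)
  · intro H
    refine ⟨⟨?_, ?_, ?_⟩, ⟨?_, ?_, ?_⟩, ?_, ?_, ?_⟩ <;> intro a h1 h2 <;> exact H a (by omega)


lemma pvE1_getD (s : List Char) (i a : Nat) (hi : i < s.length) (ha : a < s.length - 1) :
    pvF (s.eraseIdx i) a = pvF s (pvG1 i a) := by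
  have hlen : (s.eraseIdx i).length = s.length - 1 := by
    rw [List.length_eraseIdx]
    simp [hi]
  unfold pvF
  rw [List.getD_eq_getElem _ _ (by omega : a < (s.eraseIdx i).length),
      List.getD_eq_getElem _ _ (by simp only [pvG1]; split_ifs <;> omega : pvG1 i a < s.length)]
  rw [List.getElem_eraseIdx]
  simp only [pvG1]
  split_ifs <;> rfl


lemma pvA1_eq (s : List Char) (i : Nat) (hi : i < s.length) :
    pvAIsPal (s.eraseIdx i)
      = decide (∀ a, a < s.length - 1 → pvF s (pvG1 i a) = pvF s (pvG1 i (s.length - 1 - 1 - a))) := by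
  rw [pvAIsPal_getD, decide_eq_decide]
  have hlen : (s.eraseIdx i).length = s.length - 1 := by
    rw [List.length_eraseIdx]
    simp [hi]
  rw [hlen]
  constructor
  · intro H a ha
    have h := H a ha
    rw [pvE1_getD s i a hi ha, pvE1_getD s i _ hi (by omega)] at h
    exact h
  · intro H a ha
    rw [pvE1_getD s i a hi ha, pvE1_getD s i _ hi (by omega)]
    exact H a ha


lemma pvV2_len (s : List Char) (i j : Nat) (hij : i < j) (hj : j < s.length) :
    (pvV2 s i j).length = s.length - 2 := by
  unfold pvV2
  simp only [List.length_append, List.length_take, List.length_drop]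
  omega


lemma pvV2_getD (s : List Char) (i j a : Nat) (hij : i < j) (hj : j < s.length)
    (ha : a < s.length - 2) : pvF (pvV2 s i j) a = pvF s (pvG2 i j a) := by
  have h2' : a < (pvV2 s i j).length := by rw [pvV2_len s i j hij hj]; omega
  unfold pvF
  rw [List.getD_eq_getElem?_getD, List.getD_eq_getElem?_getD]
  unfold pvV2 pvG2
  simp only [List.getElem?_append, List.length_append, List.length_take, List.length_drop,
    List.getElem?_take, List.getElem?_drop]
  split_ifs <;> first
    | rfl
    | omega
    | (congr 2; omega)


lemma pvA2_eq (s : List Char) (i j : Nat) (hij : i < j) (hj : j < s.length) :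
    pvAIsPal (pvV2 s i j)
      = decide (∀ a, a < s.length - 2 → pvF s (pvG2 i j a) = pvF s (pvG2 i j (s.length - 2 - 1 - a))) := by
  rw [pvAIsPal_getD, decide_eq_decide]
  rw [pvV2_len s i j hij hj]
  constructor
  · intro H a ha
    have h := H a ha
    rw [pvV2_getD s i j a hij hj ha, pvV2_getD s i j _ hij hj (by omega)] at h
    exact h
  · intro H a ha
    rw [pvV2_getD s i j a hij hj ha, pvV2_getD s i j _ hij hj (by omega)]
    exact H a ha


lemma pvWhole_eq (s : List Char) : pvAIsPal s = pvAllm (pvBCnt s) 2 0 s.length := by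
  rw [pvAIsPal_getD, pvAllm_spec s 2 0 s.length (by omega) (le_refl _), decide_eq_decide]
  constructor
  · intro H x h0 hx
    exact (pvBOk_iff s _ x (s.length - 1 - x) hx (by omega) (by push_cast; omega)).mpr (H x hx)
  · intro H a ha
    exact (pvBOk_iff s _ a (s.length - 1 - a) ha (by omega) (by push_cast; omega)).mp (H a (by omega) ha)


lemma pvSliceErase (s : List Char) (i : Nat) (_hi : i < s.length) :
    PySem.List.slice s none (some (i : Int)) ++ PySem.List.slice s (some ((i : Int) + 1)) none
      = s.eraseIdx i := by
  rw [PySem.List.slice_to_natCast, show ((i : Int) + 1) = ((i + 1 : Nat) : Int) by push_cast; ring,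
    PySem.List.slice_from_natCast, ← List.eraseIdx_eq_take_drop_succ]


lemma pvSliceV2 (s : List Char) (i j : Nat) :
    PySem.List.slice s none (some (i : Int)) ++ PySem.List.slice s (some ((i : Int) + 1)) (some (j : Int))
      ++ PySem.List.slice s (some ((j : Int) + 1)) none = pvV2 s i j := by
  rw [PySem.List.slice_to_natCast, show ((i : Int) + 1) = ((i + 1 : Nat) : Int) by push_cast; ring,
    PySem.List.slice_natCast, show ((j : Int) + 1) = ((j + 1 : Nat) : Int) by push_cast; ring,
    PySem.List.slice_from_natCast, pvV2]


lemma pvLoop1_eq (s : List Char) (hn : 3 < s.length) : ∀ (l : List Nat), (∀ i ∈ l, i < s.length) →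
    pvALoop1 s (l.map (fun (k : Nat) => (k : Int))) = pvBLoop1 s (pvBCnt s) l := by
  intro l
  induction l with
  | nil => intro _; rfl
  | cons i rest ih =>
      intro h
      have hi' : i < s.length := h i (List.mem_cons_self)
      rw [List.map_cons, pvALoop1, pvBLoop1]
      rw [pvSliceErase s i hi']
      have hlen : (s.eraseIdx i).length = s.length - 1 := by
        rw [List.length_eraseIdx]
        simp [hi']
      rw [hlen, show decide (2 < s.length - 1) = true from decide_eq_true (by omega), Bool.and_true]
      rw [pvA1_eq s i hi', ← pvBCheck1_eq s i hi']
      cases hB : pvBCheck1 (pvBCnt s) s.length i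
      · simp only [Bool.false_eq_true, if_false]
        exact ih (fun x hx => h x (List.mem_cons_of_mem _ hx))
      · simp [PySem.List.pyGet?_natCast]


lemma pvLoop1_none (s : List Char) (hn : s.length ≤ 3) : ∀ (l : List Nat), (∀ i ∈ l, i < s.length) →
    pvALoop1 s (l.map (fun (k : Nat) => (k : Int))) = none := by
  intro l
  induction l with
  | nil => intro _; rfl
  | cons i rest ih =>
      intro h
      have hi' : i < s.length := h i (List.mem_cons_self)
      rw [List.map_cons, pvALoop1]
      rw [pvSliceErase s i hi']
      have hlen : (s.eraseIdx i).length = s.length - 1 := by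
        rw [List.length_eraseIdx]
        simp [hi']
      rw [hlen, show decide (2 < s.length - 1) = false from decide_eq_false (by omega), Bool.and_false]
      simp only [if_neg (by simp : ¬ (false = true))]
      exact ih (fun x hx => h x (List.mem_cons_of_mem _ hx))


lemma pvRangeCast : ∀ (len a : Nat),
    PySem.List.pyRange (a : Int) ((a + len : Nat) : Int) 1 = (List.range' a len).map (fun (k : Nat) => (k : Int)) := by
  intro len
  induction len with
  | zero =>
      intro a
      rw [PySem.List.pyRange_one_eq_nil (by push_cast; omega)]
      simp
  | succ k ih =>
      intro a
      rw [PySem.List.pyRange_one_cons (by push_cast; omega)]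
      rw [show ((a : Int) + 1) = ((a + 1 : Nat) : Int) by push_cast; ring]
      rw [show ((a + (k + 1) : Nat) : Int) = (((a + 1) + k : Nat) : Int) by push_cast; ring]
      rw [ih (a + 1)]
      simp [List.range'_succ]


lemma pvLoop2Inner_eq (s : List Char) (i : Nat) (hn : 4 < s.length) (_hi : i < s.length) :
    ∀ (l : List Nat), (∀ j ∈ l, i < j ∧ j < s.length) →
    pvALoop2Inner s (i : Int) (l.map (fun (k : Nat) => (k : Int))) = pvBLoop2Inner s (pvBCnt s) i l := by
  intro l
  induction l with
  | nil => intro _; rfl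
  | cons j rest ih =>
      intro h
      obtain ⟨hij, hj⟩ := h j (List.mem_cons_self)
      rw [List.map_cons, pvALoop2Inner, pvBLoop2Inner]
      rw [pvSliceV2 s i j]
      rw [pvV2_len s i j hij hj, show decide (2 < s.length - 2) = true from decide_eq_true (by omega),
        Bool.and_true]
      rw [pvA2_eq s i j hij hj, ← pvBCheck2_eq s i j hij hj]
      cases hB : pvBCheck2 (pvBCnt s) s.length i j
      · simp only [Bool.false_eq_true, if_false]
        exact ih (fun x hx => h x (List.mem_cons_of_mem _ hx))
      · simp [PySem.List.pyGet?_natCast]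


lemma pvLoop2_eq (s : List Char) (hn : 4 < s.length) : ∀ (l : List Nat), (∀ i ∈ l, i < s.length) →
    pvALoop2 s (l.map (fun (k : Nat) => (k : Int))) = pvBLoop2 s (pvBCnt s) l := by
  intro l
  induction l with
  | nil => intro _; rfl
  | cons i rest ih =>
      intro h
      have hi' : i < s.length := h i (List.mem_cons_self)
      rw [List.map_cons, pvALoop2, pvBLoop2]
      have hr : PySem.List.pyRange ((i : Int) + 1) (s.length : Int) 1
          = (List.range' (i + 1) (s.length - (i + 1))).map (fun (k : Nat) => (k : Int)) := by
        rw [show ((i : Int) + 1) = ((i + 1 : Nat) : Int) by push_cast; ring,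
          show ((s.length : Nat) : Int) = (((i + 1) + (s.length - (i + 1)) : Nat) : Int) by push_cast; omega]
        exact pvRangeCast (s.length - (i + 1)) (i + 1)
      rw [hr, pvLoop2Inner_eq s i hn hi' _ (by
        intro x hx
        rw [List.mem_range'_1] at hx
        omega)]
      cases hI : pvBLoop2Inner s (pvBCnt s) i (List.range' (i + 1) (s.length - (i + 1)))
      · simp only []
        exact ih (fun x hx => h x (List.mem_cons_of_mem _ hx))
      · simp


lemma pvLoop2Inner_none (s : List Char) (i : Nat) (hn : s.length ≤ 4) (_hi : i < s.length) :
    ∀ (l : List Nat), (∀ j ∈ l, i < j ∧ j < s.length) →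
    pvALoop2Inner s (i : Int) (l.map (fun (k : Nat) => (k : Int))) = none := by
  intro l
  induction l with
  | nil => intro _; rfl
  | cons j rest ih =>
      intro h
      obtain ⟨hij, hj⟩ := h j (List.mem_cons_self)
      rw [List.map_cons, pvALoop2Inner]
      rw [pvSliceV2 s i j]
      rw [pvV2_len s i j hij hj, show decide (2 < s.length - 2) = false from decide_eq_false (by omega),
        Bool.and_false]
      simp only [if_neg (by simp : ¬ (false = true))]
      exact ih (fun x hx => h x (List.mem_cons_of_mem _ hx))


lemma pvLoop2_none (s : List Char) (hn : s.length ≤ 4) : ∀ (l : List Nat), (∀ i ∈ l, i < s.length) →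
    pvALoop2 s (l.map (fun (k : Nat) => (k : Int))) = none := by
  intro l
  induction l with
  | nil => intro _; rfl
  | cons i rest ih =>
      intro h
      have hi' : i < s.length := h i (List.mem_cons_self)
      rw [List.map_cons, pvALoop2]
      have hr : PySem.List.pyRange ((i : Int) + 1) (s.length : Int) 1
          = (List.range' (i + 1) (s.length - (i + 1))).map (fun (k : Nat) => (k : Int)) := by
        rw [show ((i : Int) + 1) = ((i + 1 : Nat) : Int) by push_cast; ring,
          show ((s.length : Nat) : Int) = (((i + 1) + (s.length - (i + 1)) : Nat) : Int) by push_cast; omega]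
        exact pvRangeCast (s.length - (i + 1)) (i + 1)
      rw [hr, pvLoop2Inner_none s i hn hi' _ (by
        intro x hx
        rw [List.mem_range'_1] at hx
        omega)]
      exact ih (fun x hx => h x (List.mem_cons_of_mem _ hx))


-- ===== VERDICT (by name: the statement is the Claim_ definition above) =====
theorem PalindromeCreator_spec : Claim_equal_PalindromeCreator := by
  intro strParam _
  unfold Spec_PalindromeCreator PalindromeCreator PalindromeCreator_alt
  simp only []
  rw [pvWhole_eq strParam.toList]
  by_cases hpal : pvAllm (pvBCnt strParam.toList) 2 0 strParam.toList.length = true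
  · rw [if_pos hpal, if_pos hpal]
  · rw [if_neg hpal, if_neg hpal]
    have h1 : pvALoop1 strParam.toList (PySem.List.pyRange 0 (strParam.toList.length : Int) 1)
        = (if 3 < strParam.toList.length then
            pvBLoop1 strParam.toList (pvBCnt strParam.toList) (List.range strParam.toList.length)
          else none) := by
      rw [PySem.List.pyRange_zero_natCast]
      by_cases hn : 3 < strParam.toList.length
      · rw [if_pos hn, pvLoop1_eq strParam.toList hn _ (by intro x hx; exact List.mem_range.mp hx)]
      · rw [if_neg hn, pvLoop1_none strParam.toList (by omega) _ (by intro x hx; exact List.mem_range.mp hx)]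
    have h2 : pvALoop2 strParam.toList (PySem.List.pyRange 0 (strParam.toList.length : Int) 1)
        = (if 4 < strParam.toList.length then
            pvBLoop2 strParam.toList (pvBCnt strParam.toList) (List.range strParam.toList.length)
          else none) := by
      rw [PySem.List.pyRange_zero_natCast]
      by_cases hn : 4 < strParam.toList.length
      · rw [if_pos hn, pvLoop2_eq strParam.toList hn _ (by intro x hx; exact List.mem_range.mp hx)]
      · rw [if_neg hn, pvLoop2_none strParam.toList (by omega) _ (by intro x hx; exact List.mem_range.mp hx)]
    rw [h1, h2]
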